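-- pv_equiv track=rewrite | github.com/randomhusky13/e621_e926 | e621_dump.py | find_folder
-- ===== SOURCE A (Python) =====
-- def find_folder(list_of_tags, list_of_directories):
--
--    if not list_of_tags:
--       #No more tags left to check. return list_of_directories
--       return list_of_directories
--
--    if not list_of_directories:
--       #There are still tags to check but there are no more existing directories.
--       #Folder does not exist. return list_of_directories
--       return list_of_directories
--
--    new_list_of_directories = []
--
--    #get last tag from the tags list
--    tag_to_check = list_of_tags[-1]
--    #remove last tag from the list
--    del list_of_tags[-1]
--
--    for name_of_directory in list_of_directories:
--       #check if the tag exists in the name of the directory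
--       if tag_to_check in name_of_directory:
--          #if it exists, then add the name of the directory to the new list.
--          new_list_of_directories.append(name_of_directory)
--
--    #the retuned list will be filtered out with the remaining tags
--    new_list_of_directories = find_folder(list_of_tags, new_list_of_directories)
--
--    #return the final list
--    return new_list_of_directories
-- ===== SOURCE B (Python) =====
-- def find_folder(list_of_tags, list_of_directories):
--     # Single-pass filter: keep directories containing every tag as a substring.
--     # Note: unlike A, this does not mutate list_of_tags; equivalence is about the return value.
--     return [d for d in list_of_directories
--             if all(tag in d for tag in list_of_tags)]
-- ===== Notes on version B (the rewrite author's own statement) =====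
-- stated objective: simpler
-- what changed: Replaced the recursion that re-filters the directory list once per tag with a single comprehension keeping directories containing all tags (one pass over the directories); B does not mutate list_of_tags.
import Mathlib
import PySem

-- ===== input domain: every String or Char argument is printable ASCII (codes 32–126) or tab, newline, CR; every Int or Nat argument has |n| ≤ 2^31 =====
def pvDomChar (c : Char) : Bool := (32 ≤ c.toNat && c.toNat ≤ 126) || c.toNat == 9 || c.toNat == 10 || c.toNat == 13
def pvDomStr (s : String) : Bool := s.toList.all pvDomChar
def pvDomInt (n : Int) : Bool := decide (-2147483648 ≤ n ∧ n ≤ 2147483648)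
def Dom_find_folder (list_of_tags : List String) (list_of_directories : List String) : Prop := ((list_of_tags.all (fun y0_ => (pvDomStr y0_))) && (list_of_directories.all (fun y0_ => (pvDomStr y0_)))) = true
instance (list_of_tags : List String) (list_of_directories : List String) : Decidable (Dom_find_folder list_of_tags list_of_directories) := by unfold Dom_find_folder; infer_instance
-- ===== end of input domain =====

-- B replaces the per-tag recursive re-filtering with one filter keeping directories that
-- contain every tag; equivalence is about the RETURN value only (A empties list_of_tags
-- in place while directories remain, B does not mutate it).

-- ===== PORT A =====
def find_folder (list_of_tags : List String) (list_of_directories : List String) : List String :=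
  if h : list_of_tags = [] then list_of_directories
  else if list_of_directories = [] then list_of_directories
  else
    -- tag_to_check = list_of_tags[-1]; del list_of_tags[-1]; filter loop appends matches
    find_folder list_of_tags.dropLast
      (list_of_directories.foldl
        (fun acc d => if PySem.Str.isIn (list_of_tags.getLast h) d then acc ++ [d] else acc) [])
termination_by list_of_tags.length
decreasing_by
  have := List.length_pos_iff.mpr h
  simp [List.length_dropLast]; omega

-- ===== PORT B =====
def find_folder_alt (list_of_tags : List String) (list_of_directories : List String) : List String :=
  list_of_directories.filter (fun d => list_of_tags.all (fun tag => PySem.Str.isIn tag d))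

-- ===== PRECONDITION & SPEC =====
def Spec_find_folder (list_of_tags : List String) (list_of_directories : List String) (out : List String) : Prop := out = find_folder_alt list_of_tags list_of_directories
instance (list_of_tags : List String) (list_of_directories : List String) (out : List String) : Decidable (Spec_find_folder list_of_tags list_of_directories out) := by unfold Spec_find_folder; infer_instance

-- ===== CLAIM (what is proved, stated in full; the proofs are below) =====
def Claim_equal_find_folder : Prop := ∀ (list_of_tags : List String) (list_of_directories : List String), Dom_find_folder list_of_tags list_of_directories → Spec_find_folder list_of_tags list_of_directories (find_folder list_of_tags list_of_directories)

-- ===== LEMMAS AND PROOFS =====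
theorem find_folder_eq_filter (tags dirs : List String) :
    find_folder tags dirs = dirs.filter (fun d => tags.all (fun tag => PySem.Str.isIn tag d)) := by
  induction tags using List.reverseRecOn generalizing dirs with
  | nil => rw [find_folder]; simp
  | append_singleton ts t ih =>
    rw [find_folder]
    have hne : ts ++ [t] ≠ [] := by simp
    simp only [dif_neg hne]
    by_cases hd : dirs = []
    · simp [hd]
    · simp only [if_neg hd, List.dropLast_concat, List.getLast_concat,
        PySem.List.foldl_append_if_eq_filter, List.nil_append, ih, List.filter_filter]
      exact List.filter_congr (fun d _ => by simp [Bool.and_comm])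

-- ===== VERDICT (by name: the statement is the Claim_ definition above) =====
theorem find_folder_spec : Claim_equal_find_folder := by
  intro tags dirs _
  unfold Spec_find_folder find_folder_alt
  exact find_folder_eq_filter tags dirs
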